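-- pv_equiv track=rewrite | github.com/ShibilAhamed701212/clockwork | v2/clockwork/scanner/language_detector.py | detect_frameworks
-- ===== SOURCE A (Python) =====
-- from typing import Dict, List
--
-- FRAMEWORK_SIGNATURES = {
--     "flask": ("Python", "backend"),
--     "fastapi": ("Python", "api"),
--     "django": ("Python", "backend"),
--     "react": ("JavaScript", "frontend"),
--     "vue": ("JavaScript", "frontend"),
--     "express": ("JavaScript", "backend"),
--     "sqlalchemy": ("Python", "database"),
--     "pytest": ("Python", "testing"),
--     "celery": ("Python", "worker"),
-- }
--
-- def detect_frameworks(dep_names: List[str]) -> Dict[str, List[str]]: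
--     classified: Dict[str, List[str]] = {
--         "backend": [], "frontend": [], "api": [],
--         "database": [], "testing": [], "worker": []
--     }
--     for dep in dep_names:
--         key = dep.lower().replace("-", "_")
--         if key in FRAMEWORK_SIGNATURES:
--             _, category = FRAMEWORK_SIGNATURES[key]
--             classified[category].append(dep)
--     return {k: v for k, v in classified.items() if v}
-- ===== SOURCE B (Python) =====
-- from typing import Dict, List
--
-- FRAMEWORK_SIGNATURES = {
--     "flask": ("Python", "backend"),
--     "fastapi": ("Python", "api"),
--     "django": ("Python", "backend"),
--     "react": ("JavaScript", "frontend"),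
--     "vue": ("JavaScript", "frontend"),
--     "express": ("JavaScript", "backend"),
--     "sqlalchemy": ("Python", "database"),
--     "pytest": ("Python", "testing"),
--     "celery": ("Python", "worker"),
-- }
--
-- CATEGORIES = ["backend", "frontend", "api", "database", "testing", "worker"]
--
-- def _category_of(dep):
--     sig = FRAMEWORK_SIGNATURES.get(dep.lower().replace("-", "_"))
--     return sig[1] if sig is not None else None
--
-- def detect_frameworks(dep_names: List[str]) -> Dict[str, List[str]]:
--     result: Dict[str, List[str]] = {}
--     for cat in CATEGORIES:
--         matches = [dep for dep in dep_names if _category_of(dep) == cat]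
--         if matches:
--             result[cat] = matches
--     return result
-- ===== Notes on version B (the rewrite author's own statement) =====
-- stated objective: alternative
-- what changed: Replaces A's single pass that appends into a pre-seeded per-category dict (then drops empty entries) by an iteration over the six fixed category names, building each category's list with one filter over dep_names and emitting it only if non-empty.
import Mathlib
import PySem

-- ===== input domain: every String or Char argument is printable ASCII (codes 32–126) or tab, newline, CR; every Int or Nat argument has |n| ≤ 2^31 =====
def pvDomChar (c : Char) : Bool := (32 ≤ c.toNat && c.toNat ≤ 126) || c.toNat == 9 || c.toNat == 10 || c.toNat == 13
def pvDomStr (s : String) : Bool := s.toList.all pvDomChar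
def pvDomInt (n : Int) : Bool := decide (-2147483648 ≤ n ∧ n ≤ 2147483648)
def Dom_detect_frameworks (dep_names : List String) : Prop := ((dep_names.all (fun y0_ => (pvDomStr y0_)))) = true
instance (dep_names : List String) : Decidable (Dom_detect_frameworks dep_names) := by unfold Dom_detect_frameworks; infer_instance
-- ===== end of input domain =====

-- B replaces A's single classifying pass into a pre-seeded dict by a per-category scan:
-- for each fixed category, one filter over dep_names; objective: alternative decomposition (same result, no speed claim).

-- ===== PORT A =====
-- module-level constant FRAMEWORK_SIGNATURES
def pvSigs : PySem.Dict String (String × String) := PySem.Dict.mk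
  [("flask", ("Python", "backend")), ("fastapi", ("Python", "api")),
   ("django", ("Python", "backend")), ("react", ("JavaScript", "frontend")),
   ("vue", ("JavaScript", "frontend")), ("express", ("JavaScript", "backend")),
   ("sqlalchemy", ("Python", "database")), ("pytest", ("Python", "testing")),
   ("celery", ("Python", "worker"))]

def detect_frameworks (dep_names : List String) : List (String × List String) :=
  let init : PySem.Dict String (List String) := PySem.Dict.mk
    [("backend", []), ("frontend", []), ("api", []),
     ("database", []), ("testing", []), ("worker", [])]
  let classified := dep_names.foldl (fun cl dep =>
    let key := PySem.Str.replace (PySem.Str.lower dep) "-" "_"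
    match PySem.Dict.get? pvSigs key with
    | some sig => PySem.Dict.modify cl sig.2 [] (fun v => v ++ [dep])  -- classified[category].append(dep); category is always a key of cl
    | none => cl) init
  -- {k: v for k, v in classified.items() if v}: keys are distinct, so the dict comprehension is a filter of the items
  classified.items.filter (fun kv => !kv.2.isEmpty)

-- ===== PORT B =====
def pvCategories : List String := ["backend", "frontend", "api", "database", "testing", "worker"]

def pvCategoryOf (dep : String) : Option String :=
  (PySem.Dict.get? pvSigs (PySem.Str.replace (PySem.Str.lower dep) "-" "_")).map (·.2)

def detect_frameworks_alt (dep_names : List String) : List (String × List String) :=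
  pvCategories.foldl (fun res cat =>
    let matched := dep_names.filter (fun dep => pvCategoryOf dep == some cat)
    if !matched.isEmpty then res ++ [(cat, matched)] else res) []

-- ===== PRECONDITION & SPEC =====
def Spec_detect_frameworks (dep_names : List String) (out : List (String × List String)) : Prop := out = detect_frameworks_alt dep_names
instance (dep_names : List String) (out : List (String × List String)) : Decidable (Spec_detect_frameworks dep_names out) := by unfold Spec_detect_frameworks; infer_instance

-- ===== CLAIM (what is proved, stated in full; the proofs are below) =====
def Claim_equal_detect_frameworks : Prop := ∀ (dep_names : List String), Dom_detect_frameworks dep_names → Spec_detect_frameworks dep_names (detect_frameworks dep_names)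

-- ===== LEMMAS AND PROOFS =====

-- the per-category filter B computes
def pvP (cat : String) (deps : List String) : List String :=
  deps.filter (fun dep => pvCategoryOf dep == some cat)

lemma pvP_cons (cat : String) (dep : String) (deps : List String) :
    pvP cat (dep :: deps)
      = (if pvCategoryOf dep == some cat then [dep] else []) ++ pvP cat deps := by
  simp [pvP, List.filter_cons]; split <;> simp_all

-- every signature's category is one of the six
lemma pvCat_mem (dep cat : String) (h : pvCategoryOf dep = some cat) :
    cat = "backend" ∨ cat = "frontend" ∨ cat = "api" ∨
    cat = "database" ∨ cat = "testing" ∨ cat = "worker" := by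
  unfold pvCategoryOf at h
  rcases hg : PySem.Dict.get? pvSigs (PySem.Str.replace (PySem.Str.lower dep) "-" "_") with _ | sig
  · rw [hg] at h; simp at h
  · have hm := PySem.Dict.mem_items_of_get?_eq_some pvSigs hg
    rw [hg] at h
    simp only [Option.map_some, Option.some.injEq] at h
    subst h
    have : sig.2 ∈ pvSigs.items.map (fun p => p.2.2) := List.mem_map_of_mem hm
    revert this
    simp only [pvSigs]
    intro this
    simp only [List.map_cons, List.map_nil, List.mem_cons,
      List.not_mem_nil, or_false] at this
    rcases this with h | h | h | h | h | h | h | h | h <;> simp [h]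

-- reducing A's modify on the literal six-slot dict (one slot per category)
lemma pvMod_backend (b f a d t w : List String) (dep : String) :
    PySem.Dict.modify (PySem.Dict.mk [("backend", b), ("frontend", f), ("api", a),
      ("database", d), ("testing", t), ("worker", w)]) "backend" [] (fun v => v ++ [dep])
    = PySem.Dict.mk [("backend", b ++ [dep]), ("frontend", f), ("api", a),
      ("database", d), ("testing", t), ("worker", w)] := by
  simp [PySem.Dict.modify, PySem.Dict.insert, PySem.Dict.getD, PySem.Dict.get?, PySem.Dict.contains]

lemma pvMod_frontend (b f a d t w : List String) (dep : String) :
    PySem.Dict.modify (PySem.Dict.mk [("backend", b), ("frontend", f), ("api", a),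
      ("database", d), ("testing", t), ("worker", w)]) "frontend" [] (fun v => v ++ [dep])
    = PySem.Dict.mk [("backend", b), ("frontend", f ++ [dep]), ("api", a),
      ("database", d), ("testing", t), ("worker", w)] := by
  simp [PySem.Dict.modify, PySem.Dict.insert, PySem.Dict.getD, PySem.Dict.get?, PySem.Dict.contains]

lemma pvMod_api (b f a d t w : List String) (dep : String) :
    PySem.Dict.modify (PySem.Dict.mk [("backend", b), ("frontend", f), ("api", a),
      ("database", d), ("testing", t), ("worker", w)]) "api" [] (fun v => v ++ [dep])
    = PySem.Dict.mk [("backend", b), ("frontend", f), ("api", a ++ [dep]),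
      ("database", d), ("testing", t), ("worker", w)] := by
  simp [PySem.Dict.modify, PySem.Dict.insert, PySem.Dict.getD, PySem.Dict.get?, PySem.Dict.contains]

lemma pvMod_database (b f a d t w : List String) (dep : String) :
    PySem.Dict.modify (PySem.Dict.mk [("backend", b), ("frontend", f), ("api", a),
      ("database", d), ("testing", t), ("worker", w)]) "database" [] (fun v => v ++ [dep])
    = PySem.Dict.mk [("backend", b), ("frontend", f), ("api", a),
      ("database", d ++ [dep]), ("testing", t), ("worker", w)] := by
  simp [PySem.Dict.modify, PySem.Dict.insert, PySem.Dict.getD, PySem.Dict.get?, PySem.Dict.contains]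

lemma pvMod_testing (b f a d t w : List String) (dep : String) :
    PySem.Dict.modify (PySem.Dict.mk [("backend", b), ("frontend", f), ("api", a),
      ("database", d), ("testing", t), ("worker", w)]) "testing" [] (fun v => v ++ [dep])
    = PySem.Dict.mk [("backend", b), ("frontend", f), ("api", a),
      ("database", d), ("testing", t ++ [dep]), ("worker", w)] := by
  simp [PySem.Dict.modify, PySem.Dict.insert, PySem.Dict.getD, PySem.Dict.get?, PySem.Dict.contains]

lemma pvMod_worker (b f a d t w : List String) (dep : String) :
    PySem.Dict.modify (PySem.Dict.mk [("backend", b), ("frontend", f), ("api", a),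
      ("database", d), ("testing", t), ("worker", w)]) "worker" [] (fun v => v ++ [dep])
    = PySem.Dict.mk [("backend", b), ("frontend", f), ("api", a),
      ("database", d), ("testing", t), ("worker", w ++ [dep])] := by
  simp [PySem.Dict.modify, PySem.Dict.insert, PySem.Dict.getD, PySem.Dict.get?, PySem.Dict.contains]

-- invariant of A's loop: the six slots accumulate exactly B's per-category filters
lemma pvLoop (deps : List String) :
    ∀ (b f a d t w : List String),
    (deps.foldl (fun cl dep =>
      let key := PySem.Str.replace (PySem.Str.lower dep) "-" "_"
      match PySem.Dict.get? pvSigs key with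
      | some sig => PySem.Dict.modify cl sig.2 [] (fun v => v ++ [dep])
      | none => cl)
      (PySem.Dict.mk [("backend", b), ("frontend", f), ("api", a),
                      ("database", d), ("testing", t), ("worker", w)]))
    = PySem.Dict.mk [("backend", b ++ pvP "backend" deps), ("frontend", f ++ pvP "frontend" deps),
                     ("api", a ++ pvP "api" deps), ("database", d ++ pvP "database" deps),
                     ("testing", t ++ pvP "testing" deps), ("worker", w ++ pvP "worker" deps)] := by
  induction deps with
  | nil => intro b f a d t w; simp [pvP]
  | cons dep rest ih =>
    intro b f a d t w
    simp only [List.foldl_cons]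
    rcases ho : pvCategoryOf dep with _ | cat
    · have ho' : PySem.Dict.get? pvSigs (PySem.Str.replace (PySem.Str.lower dep) "-" "_") = none := by
        unfold pvCategoryOf at ho; exact Option.map_eq_none_iff.mp ho
      simp only [ho']
      rw [ih]; simp [pvP_cons, ho]
    · obtain ⟨sig, hs, hc⟩ : ∃ sig, PySem.Dict.get? pvSigs (PySem.Str.replace (PySem.Str.lower dep) "-" "_") = some sig ∧ sig.2 = cat := by
        unfold pvCategoryOf at ho
        rcases hg : PySem.Dict.get? pvSigs (PySem.Str.replace (PySem.Str.lower dep) "-" "_") with _ | sig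
        · simp [hg] at ho
        · exact ⟨sig, rfl, by simpa [hg] using ho⟩
      simp only [hs]
      rcases pvCat_mem dep cat ho with h | h | h | h | h | h <;> subst h <;> rw [hc]
      · rw [pvMod_backend, ih]; simp [pvP_cons, ho]
      · rw [pvMod_frontend, ih]; simp [pvP_cons, ho]
      · rw [pvMod_api, ih]; simp [pvP_cons, ho]
      · rw [pvMod_database, ih]; simp [pvP_cons, ho]
      · rw [pvMod_testing, ih]; simp [pvP_cons, ho]
      · rw [pvMod_worker, ih]; simp [pvP_cons, ho]

-- ===== VERDICT (by name: the statement is the Claim_ definition above) =====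
theorem detect_frameworks_spec : Claim_equal_detect_frameworks := by
  unfold Claim_equal_detect_frameworks
  intro deps _
  unfold Spec_detect_frameworks
  have hA : detect_frameworks deps
      = ((deps.foldl (fun cl dep =>
          let key := PySem.Str.replace (PySem.Str.lower dep) "-" "_"
          match PySem.Dict.get? pvSigs key with
          | some sig => PySem.Dict.modify cl sig.2 [] (fun v => v ++ [dep])
          | none => cl)
          (PySem.Dict.mk [("backend", []), ("frontend", []), ("api", []),
            ("database", []), ("testing", []), ("worker", [])])).items).filter
          (fun kv => !kv.2.isEmpty) := rfl
  have hB : detect_frameworks_alt deps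
      = pvCategories.foldl (fun res cat =>
          if !(pvP cat deps).isEmpty then res ++ [(cat, pvP cat deps)] else res) [] := rfl
  rw [hA, hB, pvLoop deps [] [] [] [] [] [],
      PySem.List.foldl_append_if (fun cat => !(pvP cat deps).isEmpty) (fun cat => (cat, pvP cat deps))]
  simp only [pvCategories, List.nil_append, List.filter_cons, List.filter_nil]
  split_ifs <;> simp_all
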